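-- pv_equiv track=rewrite | github.com/luke-dixon/aoc | 2018/11/day11.py | sqmatrix_sum_squares
-- ===== SOURCE A (Python) =====
-- def sqmatrix_sum_squares(m, size=2):
--     m2 = []
--     for i in range(len(m) - size + 1):
--         r2 = []
--         m2.append(r2)
--         for j in range(len(m) - size + 1):
--             r2.append(sum([sum(tuple(m[j:j + size])) for m in m[i:i + size]]))
--     return m2
-- ===== SOURCE B (Python) =====
-- def sqmatrix_sum_squares(m, size=2):
--     k = len(m) - size + 1
--     # horizontal pass: every row's window sums, computed once
--     row_sums = [[sum(row[j:j + size]) for j in range(k)] for row in m]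
--     # vertical pass: add size consecutive rows of window sums elementwise
--     out = []
--     for i in range(k):
--         acc = [0] * k
--         for wr in row_sums[i:i + size]:
--             acc = [a + x for a, x in zip(acc, wr)]
--         out.append(acc)
--     return out
-- ===== Notes on version B (the rewrite author's own statement) =====
-- stated objective: alternative
-- what changed: Instead of rescanning all size rows' slices for every output cell, B computes each row's horizontal window sums once and then adds size consecutive rows of those sums elementwise per output row.
import Mathlib
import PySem

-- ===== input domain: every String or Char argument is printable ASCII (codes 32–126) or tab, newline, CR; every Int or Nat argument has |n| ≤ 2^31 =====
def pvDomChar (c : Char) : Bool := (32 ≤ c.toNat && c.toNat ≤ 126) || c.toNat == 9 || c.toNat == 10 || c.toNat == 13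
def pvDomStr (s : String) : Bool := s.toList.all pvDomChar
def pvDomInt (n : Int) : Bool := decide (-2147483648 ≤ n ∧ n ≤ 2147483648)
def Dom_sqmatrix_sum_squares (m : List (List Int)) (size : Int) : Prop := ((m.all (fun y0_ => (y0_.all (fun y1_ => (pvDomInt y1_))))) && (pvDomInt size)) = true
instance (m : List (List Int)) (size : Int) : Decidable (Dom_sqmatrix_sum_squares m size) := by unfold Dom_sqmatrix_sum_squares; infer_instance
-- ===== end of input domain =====

-- B hoists the row-window sums out of A's doubly nested rescan: it computes every row's
-- horizontal window sums once, then adds size consecutive rows elementwise per output row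
-- (a different two-pass decomposition of the same double sum).


-- ===== PORT A =====
def sqmatrix_sum_squares (m : List (List Int)) (size : Int) : List (List Int) :=
  (PySem.List.pyRange 0 ((m.length : Int) - size + 1)).map (fun i =>
    (PySem.List.pyRange 0 ((m.length : Int) - size + 1)).map (fun j =>
      ((PySem.List.slice m (some i) (some (i + size))).map
        (fun row => (PySem.List.slice row (some j) (some (j + size))).sum)).sum))

-- ===== PORT B =====
def sqmatrix_sum_squares_alt (m : List (List Int)) (size : Int) : List (List Int) :=
  let k : Int := (m.length : Int) - size + 1
  -- horizontal pass: every row's window sums, computed once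
  let rowSums := m.map (fun row =>
    (PySem.List.pyRange 0 k).map (fun j => (PySem.List.slice row (some j) (some (j + size))).sum))
  -- vertical pass: add size consecutive rows of window sums elementwise
  (PySem.List.pyRange 0 k).map (fun i =>
    (PySem.List.slice rowSums (some i) (some (i + size))).foldl
      (fun acc wr => List.zipWith (· + ·) acc wr) (PySem.List.pyRepeat [0] k))

-- ===== PRECONDITION & SPEC =====
def Spec_sqmatrix_sum_squares (m : List (List Int)) (size : Int) (out : List (List Int)) : Prop := out = sqmatrix_sum_squares_alt m size
instance (m : List (List Int)) (size : Int) (out : List (List Int)) : Decidable (Spec_sqmatrix_sum_squares m size out) := by unfold Spec_sqmatrix_sum_squares; infer_instance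

-- ===== CLAIM (what is proved, stated in full; the proofs are below) =====
def Claim_equal_sqmatrix_sum_squares : Prop := ∀ (m : List (List Int)) (size : Int), Dom_sqmatrix_sum_squares m size → Spec_sqmatrix_sum_squares m size (sqmatrix_sum_squares m size)

-- ===== LEMMAS AND PROOFS =====

theorem pv_slice_map {α β : Type} (f : α → β) (l : List α) (a b : Int) :
    PySem.List.slice (l.map f) (some a) (some b) = (PySem.List.slice l (some a) (some b)).map f := by
  simp [PySem.List.slice, List.map_drop, List.map_take]

theorem pv_foldl_zip_length :
    ∀ (rows : List (List Int)) (init : List Int), (∀ r ∈ rows, r.length = init.length) →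
      (rows.foldl (fun acc wr => List.zipWith (· + ·) acc wr) init).length = init.length := by
  intro rows
  induction rows with
  | nil => intro init _; simp
  | cons r rows ih =>
    intro init h
    have hr : r.length = init.length := h r List.mem_cons_self
    have hlen : (List.zipWith (· + ·) init r).length = init.length := by
      simp [List.length_zipWith, hr]
    simp only [List.foldl_cons]
    rw [ih _ (by intro r' hr'; rw [hlen]; exact h r' (List.mem_cons_of_mem _ hr')), hlen]

theorem pv_foldl_zip_getD :
    ∀ (rows : List (List Int)) (init : List Int) (j : Nat), (∀ r ∈ rows, r.length = init.length) →
      j < init.length →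
      (rows.foldl (fun acc wr => List.zipWith (· + ·) acc wr) init).getD j 0
        = init.getD j 0 + (rows.map (fun r => r.getD j 0)).sum := by
  intro rows
  induction rows with
  | nil => intro init j _ _; simp
  | cons r rows ih =>
    intro init j h hj
    have hr : r.length = init.length := h r List.mem_cons_self
    have hlen : (List.zipWith (· + ·) init r).length = init.length := by
      simp [List.length_zipWith, hr]
    simp only [List.foldl_cons, List.map_cons, List.sum_cons]
    rw [ih _ j (by intro r' hr'; rw [hlen]; exact h r' (List.mem_cons_of_mem _ hr')) (by omega)]
    have hz : (List.zipWith (· + ·) init r).getD j 0 = init.getD j 0 + r.getD j 0 := by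
      rw [List.getD_eq_getElem _ _ (by omega), List.getElem_zipWith,
          ← List.getD_eq_getElem init 0 hj, ← List.getD_eq_getElem r 0 (by omega)]
    rw [hz]; ring

-- ===== VERDICT (by name: the statement is the Claim_ definition above) =====
theorem sqmatrix_sum_squares_spec : Claim_equal_sqmatrix_sum_squares := by
  intro m size _
  unfold Spec_sqmatrix_sum_squares sqmatrix_sum_squares sqmatrix_sum_squares_alt
  set k : Int := (m.length : Int) - size + 1 with hk
  set g : List Int → Int → Int := fun row j => (PySem.List.slice row (some j) (some (j + size))).sum with hg
  set f : List Int → List Int := fun row => (PySem.List.pyRange 0 k).map (g row) with hf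
  apply List.map_congr_left
  intro i hi
  have hrep : PySem.List.pyRepeat ([0] : List Int) k = List.replicate k.toNat 0 :=
    PySem.List.pyRepeat_singleton 0 k
  have hsl : PySem.List.slice (m.map f) (some i) (some (i + size))
      = (PySem.List.slice m (some i) (some (i + size))).map f := pv_slice_map f m i (i + size)
  rw [hsl, hrep]
  set R : List (List Int) := (PySem.List.slice m (some i) (some (i + size))).map f with hR
  have hlenf : ∀ r ∈ R, r.length = (List.replicate k.toNat (0 : Int)).length := by
    intro r hr
    obtain ⟨row, _, rfl⟩ := List.mem_map.mp hr
    simp [hf, PySem.List.length_pyRange_one]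
  apply List.ext_getElem
  · rw [pv_foldl_zip_length R _ hlenf]
    simp [PySem.List.length_pyRange_one]
  · intro j hjl hjr
    have hjk : j < k.toNat := by
      simpa [pv_foldl_zip_length R _ hlenf] using hjl
    rw [← List.getD_eq_getElem _ 0 hjr,
        pv_foldl_zip_getD R _ j hlenf (by simpa using hjk)]
    have h0 : (List.replicate k.toNat (0 : Int)).getD j 0 = 0 := by
      rw [List.getD_eq_getElem _ _ (by simpa using hjk)]; simp
    rw [h0, List.getElem_map, PySem.List.getElem_pyRange_one]
    have hRmap : R.map (fun r => r.getD j 0)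
        = (PySem.List.slice m (some i) (some (i + size))).map (fun row => g row ((0 : Int) + (j : Int))) := by
      rw [hR, List.map_map]
      apply List.map_congr_left
      intro row _
      simp only [Function.comp_apply, hf]
      rw [PySem.List.pyRange_zero k, List.map_map, PySem.List.getD_map_range _ _ _ _ hjk]
      simp
    rw [hRmap]
    ring
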